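-- pv_equiv track=rewrite | github.com/cambridge-cares/TheWorldAvatar | MARIE_SEQ2SEQ/data_generation/data_generation/create_training_data_from_kg/make_example_tail2head.py | make_canonical_question
-- ===== SOURCE A (Python) =====
-- from typing import Dict, List, Optional, Union
--
-- def make_canonical_question(ask_items: List[str]):
--     tokens = ["What are the chemical species whose "]
--     for i, ask_item in enumerate(ask_items):
--         tokens.append(ask_item)
--         if i < len(ask_items) - 2:
--             tokens.append(", ")
--         elif i == len(ask_items) - 2:
--             tokens.append(" and ")
--     tokens.append("?")
--     return "".join(tokens)
-- ===== SOURCE B (Python) =====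
-- def make_canonical_question(ask_items):
--     if not ask_items:
--         body = ""
--     elif len(ask_items) == 1:
--         body = ask_items[0]
--     else:
--         body = ", ".join(ask_items[:-1]) + " and " + ask_items[-1]
--     return "What are the chemical species whose " + body + "?"
-- ===== Notes on version B (the rewrite author's own statement) =====
-- stated objective: simpler
-- what changed: Replaces the per-index loop with enumerate and separator branches by a length-case split: join the leading items with ', ' and glue the last one with ' and '.
import Mathlib
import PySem

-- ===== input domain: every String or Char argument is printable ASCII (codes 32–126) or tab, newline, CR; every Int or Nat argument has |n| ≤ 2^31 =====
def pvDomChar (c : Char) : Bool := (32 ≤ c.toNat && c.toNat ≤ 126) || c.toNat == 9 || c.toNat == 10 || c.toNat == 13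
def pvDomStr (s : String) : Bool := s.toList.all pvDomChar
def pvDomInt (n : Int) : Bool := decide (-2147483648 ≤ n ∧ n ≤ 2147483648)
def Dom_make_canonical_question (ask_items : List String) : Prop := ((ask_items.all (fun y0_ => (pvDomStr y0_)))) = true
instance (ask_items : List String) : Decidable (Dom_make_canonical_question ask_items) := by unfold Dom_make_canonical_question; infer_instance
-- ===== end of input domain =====

-- B replaces A's per-index separator loop with a length-case split (join leading items with ", ", glue the last with " and "): simpler decomposition, same cost.


-- ===== PORT A =====
def make_canonical_question (ask_items : List String) : String :=
  let tokens : List String := ["What are the chemical species whose "]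
  let n : Int := ask_items.length
  let tokens := (PySem.List.enumerate ask_items).foldl
    (fun acc (p : Int × String) =>
      let acc := acc ++ [p.2]
      if p.1 < n - 2 then acc ++ [", "]
      else if p.1 = n - 2 then acc ++ [" and "]
      else acc) tokens
  PySem.Str.join "" (tokens ++ ["?"])

-- ===== PORT B =====
def make_canonical_question_alt (ask_items : List String) : String :=
  let body : String :=
    match ask_items with
    | [] => ""
    | [x] => x
    | x :: y :: rest =>
        PySem.Str.join ", " (List.dropLast (x :: y :: rest)) ++ " and " ++
          List.getLast (x :: y :: rest) (by simp)
  "What are the chemical species whose " ++ body ++ "?"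

-- ===== PRECONDITION & SPEC =====
def Spec_make_canonical_question (ask_items : List String) (out : String) : Prop := out = make_canonical_question_alt ask_items
instance (ask_items : List String) (out : String) : Decidable (Spec_make_canonical_question ask_items out) := by unfold Spec_make_canonical_question; infer_instance

-- ===== CLAIM (what is proved, stated in full; the proofs are below) =====
def Claim_equal_make_canonical_question : Prop := ∀ (ask_items : List String), Dom_make_canonical_question ask_items → Spec_make_canonical_question ask_items (make_canonical_question ask_items)

-- ===== LEMMAS AND PROOFS =====

/-- The body both programs build: separator ", " while ≥ 2 items remain, " and " before the last. -/
def pvBody : List String → String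
  | [] => ""
  | [x] => x
  | [x, y] => x ++ " and " ++ y
  | x :: y :: z :: rest => x ++ ", " ++ pvBody (y :: z :: rest)

theorem pvJoin0_cons (x : String) (l : List String) :
    PySem.Str.join "" (x :: l) = x ++ PySem.Str.join "" l := by
  cases l with
  | nil => simp [PySem.Str.join, PySem.Chars.join_singleton, PySem.Chars.join_nil]
  | cons y ys => simp [PySem.Str.join, PySem.Chars.join_cons_cons]

theorem pvJoin0_append (a b : List String) :
    PySem.Str.join "" (a ++ b) = PySem.Str.join "" a ++ PySem.Str.join "" b := by
  induction a with
  | nil => simp [PySem.Str.join, PySem.Chars.join_nil]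
  | cons x xs ih => rw [List.cons_append, pvJoin0_cons, pvJoin0_cons, ih, String.append_assoc]

theorem pvJoin0_single (x : String) : PySem.Str.join "" [x] = x := by
  simp [PySem.Str.join, PySem.Chars.join_singleton]

theorem pvJoin0_nil : PySem.Str.join "" [] = "" := by
  simp [PySem.Str.join, PySem.Chars.join_nil]

theorem pvLoopA (xs : List String) (n k : Int) (h : k + (xs.length : Int) = n)
    (acc : List String) :
    PySem.Str.join "" ((PySem.List.enumerate xs k).foldl
      (fun acc (p : Int × String) =>
        let acc := acc ++ [p.2]
        if p.1 < n - 2 then acc ++ [", "]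
        else if p.1 = n - 2 then acc ++ [" and "]
        else acc) acc)
    = PySem.Str.join "" acc ++ pvBody xs := by
  induction xs generalizing k acc with
  | nil =>
      simp [PySem.List.enumerate, pvBody]
  | cons x rest ih =>
      rw [PySem.List.enumerate_cons, List.foldl_cons]
      dsimp only at ih ⊢
      have hlen : k + 1 + (rest.length : Int) = n := by
        simp only [List.length_cons] at h; push_cast at h ⊢; omega
      match rest with
      | [] =>
          have h1 : ¬ ((k : Int) < n - 2) := by simp at h; omega
          have h2 : ¬ ((k : Int) = n - 2) := by simp at h; omega
          rw [if_neg h1, if_neg h2, ih (k + 1) hlen]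
          simp [pvBody, pvJoin0_append, pvJoin0_cons, pvJoin0_nil]
      | [y] =>
          have h1 : ¬ ((k : Int) < n - 2) := by simp at h; omega
          have h2 : ((k : Int) = n - 2) := by simp at h; omega
          rw [if_neg h1, if_pos h2, ih (k + 1) hlen]
          simp [pvBody, pvJoin0_append, pvJoin0_cons, pvJoin0_nil, String.append_assoc]
      | y :: z :: rs =>
          have h1 : ((k : Int) < n - 2) := by simp at h; omega
          rw [if_pos h1, ih (k + 1) hlen]
          have hb : pvBody (x :: y :: z :: rs) = x ++ ", " ++ pvBody (y :: z :: rs) := rfl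
          simp [hb, pvJoin0_append, pvJoin0_cons, pvJoin0_nil, String.append_assoc]

theorem pvA_eq (xs : List String) :
    make_canonical_question xs
      = "What are the chemical species whose " ++ pvBody xs ++ "?" := by
  unfold make_canonical_question
  rw [pvJoin0_append, pvLoopA xs (xs.length : Int) 0 (by simp)]
  simp [pvJoin0_single, String.append_assoc]

theorem pvJoinComma_cons (x y : String) (l : List String) :
    PySem.Str.join ", " (x :: y :: l) = x ++ ", " ++ PySem.Str.join ", " (y :: l) := by
  refine String.toList_inj.1 ?_
  simp [PySem.Str.toList_join, PySem.Chars.join_cons_cons]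

theorem pvB_body (x y : String) (rest : List String) :
    PySem.Str.join ", " (List.dropLast (x :: y :: rest)) ++ " and " ++
      List.getLast (x :: y :: rest) (by simp)
    = pvBody (x :: y :: rest) := by
  induction rest generalizing x y with
  | nil =>
      simp [pvBody, PySem.Str.join, PySem.Chars.join_singleton]
  | cons z rs ih =>
      have hd : List.dropLast (x :: y :: z :: rs) = x :: List.dropLast (y :: z :: rs) := by
        simp [List.dropLast]
      have hd2 : List.dropLast (y :: z :: rs) = y :: List.dropLast (z :: rs) := by
        simp [List.dropLast]
      have hl : List.getLast (x :: y :: z :: rs) (by simp)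
          = List.getLast (y :: z :: rs) (by simp) := by
        simp [List.getLast]
      have hb : pvBody (x :: y :: z :: rs) = x ++ ", " ++ pvBody (y :: z :: rs) := rfl
      rw [hd, hd2, pvJoinComma_cons, hl, hb, ← ih y z]
      rw [hd2]
      simp [String.append_assoc]

theorem pvB_eq (xs : List String) :
    make_canonical_question_alt xs
      = "What are the chemical species whose " ++ pvBody xs ++ "?" := by
  unfold make_canonical_question_alt
  match xs with
  | [] => simp [pvBody]
  | [x] => simp [pvBody]
  | x :: y :: rest => rw [← pvB_body x y rest]

-- ===== VERDICT (by name: the statement is the Claim_ definition above) =====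
theorem make_canonical_question_spec : Claim_equal_make_canonical_question := by
  intro xs _
  unfold Spec_make_canonical_question
  rw [pvA_eq, pvB_eq]
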